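-- pv_equiv track=rewrite | github.com/lorentzius/Helt-acho | upg2.py | most_common_words_finder
-- ===== SOURCE A (Python) =====
-- def most_common_words_finder(dictionary):
--     if not dictionary:
--         return {}
--
--     maxvalue_of_following_word = 0
--     for following_words in dictionary.values():
--        if len(following_words) > maxvalue_of_following_word:
--             maxvalue_of_following_word = len(following_words)
--
--     most_common_words_dictionary = {}
--     for word, following_words in dictionary.items():
--         if len(following_words) == maxvalue_of_following_word:
--             most_common_words_dictionary[word] = following_words
--     return most_common_words_dictionary
-- ===== SOURCE B (Python) =====
-- def most_common_words_finder(dictionary):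
--     best = 0
--     winners = {}
--     for word, following_words in dictionary.items():
--         n = len(following_words)
--         if n > best:
--             best = n
--             winners = {word: following_words}
--         elif n == best:
--             winners[word] = following_words
--     return winners
-- ===== Notes on version B (the rewrite author's own statement) =====
-- stated objective: simpler
-- what changed: Replaces A's two scanning passes (compute max length, then filter) by a single pass that keeps a running maximum and a winners dict which is reset whenever a strictly longer value list is seen.
import Mathlib
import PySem

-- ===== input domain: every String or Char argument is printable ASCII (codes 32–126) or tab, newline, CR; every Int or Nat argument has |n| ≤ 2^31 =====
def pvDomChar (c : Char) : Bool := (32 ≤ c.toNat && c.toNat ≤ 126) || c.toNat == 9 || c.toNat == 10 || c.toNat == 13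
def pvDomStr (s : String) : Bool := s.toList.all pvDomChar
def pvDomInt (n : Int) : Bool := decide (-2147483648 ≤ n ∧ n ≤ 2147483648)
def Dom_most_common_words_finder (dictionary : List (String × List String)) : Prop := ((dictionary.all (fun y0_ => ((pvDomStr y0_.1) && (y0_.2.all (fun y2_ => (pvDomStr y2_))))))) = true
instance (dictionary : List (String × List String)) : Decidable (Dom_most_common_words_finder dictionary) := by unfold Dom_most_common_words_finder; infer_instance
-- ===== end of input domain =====

-- B replaces A's two passes (max then filter) by one pass with a running max and a
-- winners dict reset on a new max; objective: simpler (single traversal).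

-- ===== PORT A =====
def most_common_words_finder (dictionary : List (String × List String)) : List (String × List String) :=
  if dictionary = [] then []
  else
    -- first loop: maximum of len(following_words) starting from 0
    let maxv := dictionary.foldl
      (fun acc p => if p.2.length > acc then p.2.length else acc) 0
    -- second loop: build the result dict of entries whose list has that length
    (dictionary.foldl
      (fun (d : PySem.Dict String (List String)) p =>
        if p.2.length = maxv then d.insert p.1 p.2 else d)
      PySem.Dict.empty).items

-- ===== PORT B =====
-- one loop step: running best length and winners dict (reset on a strictly larger length)
def mcwfStep (st : Nat × PySem.Dict String (List String)) (p : String × List String) :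
    Nat × PySem.Dict String (List String) :=
  let n := p.2.length
  if n > st.1 then (n, (PySem.Dict.empty).insert p.1 p.2)
  else if n = st.1 then (st.1, st.2.insert p.1 p.2)
  else st

def most_common_words_finder_alt (dictionary : List (String × List String)) : List (String × List String) :=
  (dictionary.foldl mcwfStep (0, PySem.Dict.empty)).2.items

-- ===== PRECONDITION & SPEC =====
def Spec_most_common_words_finder (dictionary : List (String × List String)) (out : List (String × List String)) : Prop := out = most_common_words_finder_alt dictionary
instance (dictionary : List (String × List String)) (out : List (String × List String)) : Decidable (Spec_most_common_words_finder dictionary out) := by unfold Spec_most_common_words_finder; infer_instance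

-- ===== CLAIM (what is proved, stated in full; the proofs are below) =====
def Claim_equal_most_common_words_finder : Prop := ∀ (dictionary : List (String × List String)), Dom_most_common_words_finder dictionary → Spec_most_common_words_finder dictionary (most_common_words_finder dictionary)

-- ===== LEMMAS AND PROOFS =====

-- A's first loop, generalized over the start value
def mcwfMax (dictionary : List (String × List String)) (b : Nat) : Nat :=
  dictionary.foldl (fun acc p => if p.2.length > acc then p.2.length else acc) b

lemma mcwfMax_ge (d : List (String × List String)) (b : Nat) : b ≤ mcwfMax d b := by
  induction d generalizing b with
  | nil => simp [mcwfMax]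
  | cons p t ih =>
    simp only [mcwfMax, List.foldl_cons]
    split
    · exact le_trans (le_of_lt (by assumption)) (ih _)
    · exact ih b

-- one-pass invariant: B's fold equals (max, A's filter-fold), with a fresh dict unless
-- the running max never improved
lemma mcwf_main (d : List (String × List String)) (b : Nat) (w : PySem.Dict String (List String)) :
    d.foldl mcwfStep (b, w) =
      (mcwfMax d b,
       d.foldl (fun w' p => if p.2.length = mcwfMax d b then w'.insert p.1 p.2 else w')
         (if mcwfMax d b = b then w else PySem.Dict.empty)) := by
  induction d generalizing b w with
  | nil => simp [mcwfMax]
  | cons p t ih =>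
    have hM : mcwfMax (p :: t) b = mcwfMax t (if p.2.length > b then p.2.length else b) := by
      simp [mcwfMax]
    by_cases h1 : p.2.length > b
    · -- running max improves: winners reset to {p}
      have hM' : mcwfMax (p :: t) b = mcwfMax t p.2.length := by simp [hM, h1]
      have hge : p.2.length ≤ mcwfMax t p.2.length := mcwfMax_ge t _
      have hb : p.2.length ≠ b := by omega
      have hb' : mcwfMax t p.2.length ≠ b := by omega
      simp only [List.foldl_cons, mcwfStep, if_pos h1, ih, hM', if_neg hb']
      by_cases h2 : mcwfMax t p.2.length = p.2.length
      · simp [h2]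
      · have : p.2.length ≠ mcwfMax t p.2.length := fun h => h2 h.symm
        simp [h2, this]
    · -- running max unchanged on this element
      have hM' : mcwfMax (p :: t) b = mcwfMax t b := by simp [hM, h1]
      have hgeb : b ≤ mcwfMax t b := mcwfMax_ge t b
      by_cases h2 : p.2.length = b
      · -- equal: p inserted into winners
        simp only [List.foldl_cons, mcwfStep, if_neg h1, if_pos h2, ih, hM']
        by_cases h3 : mcwfMax t b = b
        · simp [h3, h2]
        · have : p.2.length ≠ mcwfMax t b := by omega
          simp [h3, this]
      · -- smaller: state unchanged, and p is below the final max too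
        have hlt : p.2.length < b := by omega
        have : p.2.length ≠ mcwfMax t b := by omega
        simp only [List.foldl_cons, mcwfStep, if_neg h1, if_neg h2, ih, hM', this, if_false]

-- ===== VERDICT (by name: the statement is the Claim_ definition above) =====
theorem most_common_words_finder_spec : Claim_equal_most_common_words_finder := by
  intro d _
  show most_common_words_finder d = most_common_words_finder_alt d
  unfold most_common_words_finder most_common_words_finder_alt
  rw [mcwf_main]
  cases d with
  | nil => simp [mcwfMax, PySem.Dict.empty]
  | cons p t =>
    simp only [if_neg (List.cons_ne_nil p t)]
    congr 1
    split <;> rfl
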